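-- pv_equiv track=rewrite | github.com/pablocalderon9408/Learning-Path | Backend_Development_Python_Django/python_intermediate_lambdas/test.py | solution
-- ===== SOURCE A (Python) =====
-- def solution(input_given):
--     # write your code in Python 3.6
--     if type(input_given) is str:
--         if len(input_given)>2 and len(input_given)<=300000:
--             input_given_to_validate = input_given.lower()
--             max_distance = 0
--             for index in range(0, len(input_given_to_validate)):
--                 digram = input_given_to_validate[index:index+2]
--                 for digram2 in range(index + 1, len(input_given_to_validate)):
--                     if digram == input_given_to_validate[digram2:digram2+2]:
--                         distance = digram2 - index
--                         if distance > max_distance: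
--                             max_distance = distance
--             if max_distance == 0:
--                 return -1
--             return max_distance
-- ===== SOURCE B (Python) =====
-- def solution(input_given):
--     if type(input_given) is str:
--         n = len(input_given)
--         if 2 < n <= 300000:
--             s = input_given.lower()
--             first = {}
--             max_distance = 0
--             for j in range(n):
--                 d = s[j:j+2]
--                 if d in first:
--                     dist = j - first[d]
--                     if dist > max_distance:
--                         max_distance = dist
--                 else:
--                     first[d] = j
--             if max_distance == 0:
--                 return -1
--             return max_distance
-- ===== Notes on version B (the rewrite author's own statement) =====
-- stated objective: faster
-- what changed: Replaced the O(n^2) all-pairs digram comparison by a single left-to-right pass that records each digram's first index in a dict and maximizes j - first[digram].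
import Mathlib
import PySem

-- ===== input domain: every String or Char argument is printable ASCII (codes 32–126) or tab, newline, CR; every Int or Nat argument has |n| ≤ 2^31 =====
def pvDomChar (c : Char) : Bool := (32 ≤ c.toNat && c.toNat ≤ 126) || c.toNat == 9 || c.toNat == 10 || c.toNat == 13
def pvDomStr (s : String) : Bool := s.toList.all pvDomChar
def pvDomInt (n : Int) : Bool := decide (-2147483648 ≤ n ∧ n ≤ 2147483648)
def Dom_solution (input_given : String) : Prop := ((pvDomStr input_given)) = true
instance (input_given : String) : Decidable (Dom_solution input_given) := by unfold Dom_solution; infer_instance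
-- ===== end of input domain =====

-- B replaces A's O(n^2) all-pairs digram scan by one pass with a dict of each digram's
-- first index, maximizing j - first[digram]; return value proved equal on all inputs.

-- ===== PORT A =====
def solution (input_given : String) : Option Int :=
  if 2 < PySem.Str.len input_given ∧ PySem.Str.len input_given ≤ 300000 then
    let s : List Char := PySem.Chars.lower input_given.toList
    let md : Int :=
      (PySem.List.pyRange 0 (PySem.Chars.len s) 1).foldl (fun md index =>
        let digram := PySem.List.slice s (some index) (some (index + 2))
        (PySem.List.pyRange (index + 1) (PySem.Chars.len s) 1).foldl (fun md digram2 =>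
          if digram = PySem.List.slice s (some digram2) (some (digram2 + 2)) then
            let distance := digram2 - index
            if distance > md then distance else md
          else md) md) 0
    if md = 0 then some (-1) else some md
  else none

-- ===== PORT B =====
def solution_alt (input_given : String) : Option Int :=
  if 2 < PySem.Str.len input_given ∧ PySem.Str.len input_given ≤ 300000 then
    let s : List Char := PySem.Chars.lower input_given.toList
    let st :=
      (PySem.List.pyRange 0 (PySem.Chars.len s) 1).foldl
        (fun (st : PySem.Dict (List Char) Int × Int) j =>
          let d := PySem.List.slice s (some j) (some (j + 2))
          match st.1.get? d with
          | some i => (st.1, if j - i > st.2 then j - i else st.2)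
          | none => (st.1.insert d j, st.2))
        (PySem.Dict.empty, 0)
    if st.2 = 0 then some (-1) else some st.2
  else none

-- ===== PRECONDITION & SPEC =====
def Spec_solution (input_given : String) (out : Option Int) : Prop := out = solution_alt input_given
instance (input_given : String) (out : Option Int) : Decidable (Spec_solution input_given out) := by unfold Spec_solution; infer_instance

-- ===== CLAIM (what is proved, stated in full; the proofs are below) =====
def Claim_equal_solution : Prop := ∀ (input_given : String), Dom_solution input_given → Spec_solution input_given (solution input_given)

-- ===== LEMMAS AND PROOFS =====

-- A's nested loop, abstracted over the digram function
def pvStepA (dig : Int → List Char) (n : Int) (md i : Int) : Int :=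
  (PySem.List.pyRange (i + 1) n 1).foldl (fun md j =>
    if dig i = dig j then (if j - i > md then j - i else md) else md) md

def pvA (dig : Int → List Char) (n : Int) : Int :=
  (PySem.List.pyRange 0 n 1).foldl (pvStepA dig n) 0

-- B's single pass, abstracted likewise
def pvStepB (dig : Int → List Char) (st : PySem.Dict (List Char) Int × Int) (j : Int) :
    PySem.Dict (List Char) Int × Int :=
  match st.1.get? (dig j) with
  | some i => (st.1, if j - i > st.2 then j - i else st.2)
  | none => (st.1.insert (dig j) j, st.2)

def pvB (dig : Int → List Char) (n : Int) : PySem.Dict (List Char) Int × Int :=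
  (PySem.List.pyRange 0 n 1).foldl (pvStepB dig) (PySem.Dict.empty, 0)

-- generic running-max fold facts
theorem pvFold_mono {α : Type} (f : Int → α → Int) (h : ∀ m x, m ≤ f m x) :
    ∀ (L : List α) (init : Int), init ≤ L.foldl f init := by
  intro L
  induction L with
  | nil => intro init; exact le_refl _
  | cons x L ih => intro init; exact le_trans (h init x) (ih (f init x))

theorem pvFold_ub {α : Type} (f : Int → α → Int) (h : ∀ m x, m ≤ f m x)
    {v : Int} {x : α} (hv : ∀ m, v ≤ f m x) :
    ∀ (L : List α) (init : Int), x ∈ L → v ≤ L.foldl f init := by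
  intro L
  induction L with
  | nil => intro init hx; cases hx
  | cons y L ih =>
    intro init hx
    rcases List.mem_cons.mp hx with rfl | hx
    · exact le_trans (hv init) (pvFold_mono f h L (f init x))
    · exact ih (f init y) hx

theorem pvFold_att {α : Type} (f : Int → α → Int) (P : Int → Prop) :
    ∀ (L : List α), (∀ m x, x ∈ L → f m x = m ∨ P (f m x)) →
      ∀ init, L.foldl f init = init ∨ P (L.foldl f init) := by
  intro L
  induction L with
  | nil => intro _ init; exact Or.inl rfl
  | cons x L ih =>
    intro h init
    have hx := h init x (List.mem_cons_self)
    have hrest := ih (fun m y hy => h m y (List.mem_cons_of_mem _ hy)) (f init x)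
    rcases hrest with heq | hP
    · rw [List.foldl_cons, heq]
      rcases hx with h1 | h2
      · exact Or.inl h1
      · exact Or.inr h2
    · exact Or.inr hP

-- the pair predicate
def pvPair (dig : Int → List Char) (n i j : Int) : Prop :=
  0 ≤ i ∧ i < j ∧ j < n ∧ dig i = dig j

theorem pvStepA_mono (dig : Int → List Char) (n : Int) (m i : Int) : m ≤ pvStepA dig n m i := by
  exact pvFold_mono _ (fun m j => by split_ifs <;> omega) _ m

theorem pvA_nonneg (dig : Int → List Char) (n : Int) : 0 ≤ pvA dig n :=
  pvFold_mono _ (fun m i => pvStepA_mono dig n m i) _ 0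

theorem pvA_ub (dig : Int → List Char) (n : Int) {i j : Int} (hp : pvPair dig n i j) :
    j - i ≤ pvA dig n := by
  obtain ⟨h0, hij, hjn, hdig⟩ := hp
  apply pvFold_ub (pvStepA dig n) (fun m i => pvStepA_mono dig n m i)
    (v := j - i) (x := i) _ _ 0
  · exact (PySem.List.mem_pyRange_one).mpr ⟨h0, by omega⟩
  · intro m
    apply pvFold_ub _ (fun m j => by split_ifs <;> omega)
      (v := j - i) (x := j) _ _ m
    · exact (PySem.List.mem_pyRange_one).mpr ⟨by omega, hjn⟩
    · intro m'; rw [if_pos hdig]; split_ifs <;> omega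

theorem pvA_att (dig : Int → List Char) (n : Int) :
    pvA dig n = 0 ∨ ∃ i j, pvPair dig n i j ∧ pvA dig n = j - i := by
  apply pvFold_att _ (fun md => ∃ i j, pvPair dig n i j ∧ md = j - i)
  intro m i hi
  have hi' := (PySem.List.mem_pyRange_one).mp hi
  apply pvFold_att _ (fun md => ∃ i j, pvPair dig n i j ∧ md = j - i)
  intro m' j hj
  have hj' := (PySem.List.mem_pyRange_one).mp hj
  split_ifs with hdig hgt
  · exact Or.inr ⟨i, j, ⟨hi'.1, by omega, hj'.2, hdig⟩, rfl⟩
  · exact Or.inl rfl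
  · exact Or.inl rfl

-- B's loop invariant after processing indices [0, k)
def pvInv (dig : Int → List Char) (k : Int) (st : PySem.Dict (List Char) Int × Int) : Prop :=
  (∀ d i, st.1.get? d = some i →
      0 ≤ i ∧ i < k ∧ dig i = d ∧ ∀ i', 0 ≤ i' → i' < k → dig i' = d → i ≤ i')
  ∧ (∀ i, 0 ≤ i → i < k → (st.1.get? (dig i)).isSome)
  ∧ 0 ≤ st.2
  ∧ (∀ i j, 0 ≤ i → i < j → j < k → dig i = dig j → j - i ≤ st.2)
  ∧ (st.2 = 0 ∨ ∃ i j, 0 ≤ i ∧ i < j ∧ j < k ∧ dig i = dig j ∧ st.2 = j - i)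

theorem pvInv_zero (dig : Int → List Char) :
    pvInv dig 0 (PySem.Dict.empty, 0) := by
  refine ⟨?_, ?_, le_refl _, ?_, Or.inl rfl⟩
  · intro d i h; rw [PySem.Dict.get?_empty] at h; cases h
  · intro i h0 hk; omega
  · intro i j h0 hij hjk; omega

theorem pvInv_step (dig : Int → List Char) (k : Int) (st : PySem.Dict (List Char) Int × Int)
    (hk : 0 ≤ k) (h : pvInv dig k st) : pvInv dig (k + 1) (pvStepB dig st k) := by
  obtain ⟨h1, h2, h3, h4, h5⟩ := h
  unfold pvStepB
  cases hg : st.1.get? (dig k) with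
  | some i =>
    obtain ⟨hi0, hik, hdig, hmin⟩ := h1 _ _ hg
    refine ⟨?_, ?_, ?_, ?_, ?_⟩
    · intro d i' hgi
      obtain ⟨a, b, c, e⟩ := h1 _ _ hgi
      refine ⟨a, by omega, c, ?_⟩
      intro i'' h0 hlt hd
      rcases lt_or_eq_of_le (by omega : i'' ≤ k) with hlt' | rfl
      · exact e i'' h0 hlt' hd
      · omega
    · intro i' h0 hlt
      rcases lt_or_eq_of_le (by omega : i' ≤ k) with hlt' | rfl
      · exact h2 i' h0 hlt'
      · rw [hg]; rfl
    · dsimp only; split_ifs <;> omega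
    · intro i0 j h0 hij hjk hd
      dsimp only
      rcases lt_or_eq_of_le (by omega : j ≤ k) with hlt' | rfl
      · have := h4 i0 j h0 hij hlt' hd
        split_ifs <;> omega
      · have hle : i ≤ i0 := by
          apply hmin i0 h0 hij
          rw [hd]
        split_ifs <;> omega
    · dsimp only
      split_ifs with hgt
      · exact Or.inr ⟨i, k, hi0, hik, by omega, hdig, rfl⟩
      · rcases h5 with he | ⟨a, b, p1, p2, p3, p4, p5⟩
        · exact Or.inl he
        · exact Or.inr ⟨a, b, p1, p2, by omega, p4, p5⟩
  | none =>
    refine ⟨?_, ?_, h3, ?_, ?_⟩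
    · intro d i' hgi
      dsimp only at hgi
      rw [PySem.Dict.get?_insert] at hgi
      split_ifs at hgi with hdk
      · subst hdk
        injection hgi with hi'
        subst hi'
        refine ⟨hk, by omega, rfl, ?_⟩
        intro i'' h0 hlt hd
        rcases lt_or_eq_of_le (by omega : i'' ≤ k) with hlt' | rfl
        · exfalso
          have := h2 i'' h0 hlt'
          rw [hd, hg] at this
          simp at this
        · omega
      · obtain ⟨a, b, c, e⟩ := h1 _ _ hgi
        refine ⟨a, by omega, c, ?_⟩
        intro i'' h0 hlt hd
        rcases lt_or_eq_of_le (by omega : i'' ≤ k) with hlt' | rfl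
        · exact e i'' h0 hlt' hd
        · exfalso; exact hdk (hd ▸ rfl)
    · intro i' h0 hlt
      dsimp only
      rw [PySem.Dict.get?_insert]
      split_ifs with hdk
      · rfl
      · rcases lt_or_eq_of_le (by omega : i' ≤ k) with hlt' | rfl
        · exact h2 i' h0 hlt'
        · exact absurd rfl hdk
    · intro i0 j h0 hij hjk hd
      dsimp only
      rcases lt_or_eq_of_le (by omega : j ≤ k) with hlt' | rfl
      · exact h4 i0 j h0 hij hlt' hd
      · exfalso
        have := h2 i0 h0 hij
        rw [hd, hg] at this
        simp at this
    · rcases h5 with he | ⟨a, b, p1, p2, p3, p4, p5⟩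
      · exact Or.inl he
      · exact Or.inr ⟨a, b, p1, p2, by omega, p4, p5⟩

theorem pvB_inv_nat (dig : Int → List Char) (m : Nat) :
    pvInv dig (m : Int) (pvB dig (m : Int)) := by
  induction m with
  | zero =>
    have : pvB dig 0 = (PySem.Dict.empty, 0) := by
      unfold pvB
      rw [PySem.List.pyRange_one_eq_nil (by omega)]
      rfl
    rw [Int.natCast_zero, this]
    exact pvInv_zero dig
  | succ m ih =>
    have hsplit : PySem.List.pyRange 0 ((m : Int) + 1) 1 =
        PySem.List.pyRange 0 (m : Int) 1 ++ [(m : Int)] :=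
      PySem.List.pyRange_one_succ_right (by omega)
    have : pvB dig ((m : Int) + 1) = pvStepB dig (pvB dig (m : Int)) (m : Int) := by
      unfold pvB
      rw [hsplit, List.foldl_append]
      rfl
    rw [show ((m + 1 : Nat) : Int) = (m : Int) + 1 by push_cast; ring, this]
    exact pvInv_step dig (m : Int) _ (by omega) ih

theorem pvB_inv (dig : Int → List Char) (n : Int) (hn : 0 ≤ n) :
    pvInv dig n (pvB dig n) := by
  have := pvB_inv_nat dig n.toNat
  rwa [Int.toNat_of_nonneg hn] at this

theorem pvAB (dig : Int → List Char) (n : Int) (hn : 0 ≤ n) :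
    pvA dig n = (pvB dig n).2 := by
  obtain ⟨_, _, hB0, hBub, hBatt⟩ := pvB_inv dig n hn
  apply le_antisymm
  · rcases pvA_att dig n with he | ⟨i, j, ⟨p1, p2, p3, p4⟩, he⟩
    · rw [he]; exact hB0
    · rw [he]; exact hBub i j p1 p2 p3 p4
  · rcases hBatt with he | ⟨i, j, p1, p2, p3, p4, he⟩
    · rw [he]; exact pvA_nonneg dig n
    · rw [he]; exact pvA_ub dig n ⟨p1, p2, p3, p4⟩

-- ===== VERDICT (by name: the statement is the Claim_ definition above) =====
theorem solution_spec : Claim_equal_solution := by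
  intro input_given _
  unfold Spec_solution solution solution_alt
  split_ifs with h
  · exact congrArg (fun m => if m = 0 then some (-1) else some m)
      (pvAB (fun i => PySem.List.slice (PySem.Chars.lower input_given.toList) (some i) (some (i + 2)))
        (PySem.Chars.len (PySem.Chars.lower input_given.toList))
        (by simp [PySem.Chars.len]))
  · rfl
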